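-- pv_equiv track=rewrite | github.com/jc202/python-intro | examples/april/apr14/phone_format.py | update_phone
-- ===== SOURCE A (Python) =====
-- def update_phone(phone):
--     answer = ""
--
--     for letter in phone:
--         if letter == "(" or letter == ")":
--             continue
--         elif letter == "-":
--             answer += "."
--         else:
--             answer += letter
--
--     return answer
-- ===== SOURCE B (Python) =====
-- def update_phone(phone):
--     return phone.replace("(", "").replace(")", "").replace("-", ".")
-- ===== Notes on version B (the rewrite author's own statement) =====
-- stated objective: simpler
-- what changed: Replaced A's character-by-character branching loop with three whole-string str.replace passes (delete the two parenthesis characters, then map dash to dot); the substituted characters are disjoint so the result is identical, and the C-level replace makes it measurably faster.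
import Mathlib
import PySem

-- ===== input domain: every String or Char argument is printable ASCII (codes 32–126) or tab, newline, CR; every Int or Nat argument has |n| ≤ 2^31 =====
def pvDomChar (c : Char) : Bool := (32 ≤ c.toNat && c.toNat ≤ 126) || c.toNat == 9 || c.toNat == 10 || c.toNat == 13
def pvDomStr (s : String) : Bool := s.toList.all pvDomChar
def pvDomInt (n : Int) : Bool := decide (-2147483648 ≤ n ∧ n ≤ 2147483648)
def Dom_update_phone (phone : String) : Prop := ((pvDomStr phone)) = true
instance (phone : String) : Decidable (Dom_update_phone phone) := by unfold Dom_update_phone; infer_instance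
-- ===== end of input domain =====

-- B replaces A's single character-by-character branching loop with three whole-string
-- replace passes (the substituted characters are disjoint); objective: simpler.

-- ===== PORT A =====
-- A: one pass over the characters, building the answer string.
def update_phone (phone : String) : String :=
  phone.toList.foldl
    (fun answer letter =>
      if letter = '(' ∨ letter = ')' then answer
      else if letter = '-' then answer ++ "."
      else answer ++ String.singleton letter)
    ""

-- ===== PORT B =====
-- B: phone.replace("(", "").replace(")", "").replace("-", ".")
def update_phone_alt (phone : String) : String :=
  PySem.Str.replace (PySem.Str.replace (PySem.Str.replace phone "(" "") ")" "") "-" "."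

-- ===== PRECONDITION & SPEC =====
def Spec_update_phone (phone : String) (out : String) : Prop := out = update_phone_alt phone
instance (phone : String) (out : String) : Decidable (Spec_update_phone phone out) := by unfold Spec_update_phone; infer_instance

-- ===== CLAIM (what is proved, stated in full; the proofs are below) =====
def Claim_equal_update_phone : Prop := ∀ (phone : String), Dom_update_phone phone → Spec_update_phone phone (update_phone phone)

-- ===== LEMMAS AND PROOFS =====

-- replace.go with a single-character pattern acts elementwise.
lemma replace_go_single (c : Char) (ns : List Char) :
    ∀ (fuel : Nat) (l acc : List Char), l.length ≤ fuel →
      PySem.Chars.replace.go [c] ns fuel l acc =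
        acc.reverse ++ l.flatMap (fun x => if x = c then ns else [x]) := by
  intro fuel
  induction fuel with
  | zero =>
    intro l acc h
    interval_cases hl : l.length
    · simp at hl
      subst hl
      simp [PySem.Chars.replace.go]
  | succ n ih =>
    intro l acc h
    cases l with
    | nil => simp [PySem.Chars.replace.go]
    | cons x t =>
      simp only [PySem.Chars.replace.go]
      by_cases hx : x = c
      · subst hx
        have hp : List.isPrefixOf [x] (x :: t) = true := by simp [List.isPrefixOf]
        rw [if_pos hp]
        simp only [List.length_singleton, List.drop_succ_cons, List.drop_zero]
        rw [ih t (ns.reverse ++ acc) (by simpa using Nat.le_of_succ_le_succ h)]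
        simp [List.flatMap_cons]
      · have hp : List.isPrefixOf [c] (x :: t) = false := by
          simp only [List.isPrefixOf, Bool.and_eq_false_iff]
          exact Or.inl (beq_eq_false_iff_ne.mpr (Ne.symm hx))
        rw [if_neg (by simp [hp])]
        rw [ih t (x :: acc) (by simpa using Nat.le_of_succ_le_succ h)]
        simp [List.flatMap_cons, hx]

lemma replace_single (c : Char) (ns s : List Char) :
    PySem.Chars.replace s [c] ns = s.flatMap (fun x => if x = c then ns else [x]) := by
  simp only [PySem.Chars.replace, List.isEmpty_cons, Bool.false_eq_true, if_false]
  simpa using replace_go_single c ns s.length s [] le_rfl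

-- the per-character map A applies
def charSub (x : Char) : List Char :=
  if x = '(' ∨ x = ')' then [] else if x = '-' then ['.'] else [x]

lemma update_phone_toList_aux (l : List Char) :
    ∀ (acc : String),
      (l.foldl (fun answer letter =>
        if letter = '(' ∨ letter = ')' then answer
        else if letter = '-' then answer ++ "."
        else answer ++ String.singleton letter) acc).toList
      = acc.toList ++ l.flatMap charSub := by
  induction l with
  | nil => intro acc; simp
  | cons x t ih =>
    intro acc
    simp only [List.foldl_cons, List.flatMap_cons, charSub]
    split_ifs with h1 h2
    · rw [ih]; simp
    · rw [ih]; simp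
    · rw [ih]; simp

lemma flatMap_chain (l : List Char) :
    ((l.flatMap (fun x => if x = '(' then ([] : List Char) else [x])).flatMap
        (fun x => if x = ')' then ([] : List Char) else [x])).flatMap
      (fun x => if x = '-' then ['.'] else [x]) = l.flatMap charSub := by
  rw [List.flatMap_assoc, List.flatMap_assoc]
  apply List.flatMap_congr
  intro x _
  by_cases h1 : x = '('
  · simp [h1, charSub]
  · by_cases h2 : x = ')'
    · simp [h2, charSub]
    · by_cases h3 : x = '-'
      · simp [h3, charSub]
      · simp [h1, h2, h3, charSub]

-- ===== VERDICT (by name: the statement is the Claim_ definition above) =====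
theorem update_phone_spec : Claim_equal_update_phone := by
  intro phone _
  unfold Spec_update_phone update_phone update_phone_alt
  rw [← String.toList_inj]
  rw [update_phone_toList_aux]
  simp only [PySem.Str.toList_replace]
  rw [show ("(" : String).toList = ['('] from by decide, show (")" : String).toList = [')'] from by decide,
      show ("-" : String).toList = ['-'] from by decide, show ("." : String).toList = ['.'] from by decide,
      show ("" : String).toList = [] from by decide]
  rw [replace_single, replace_single, replace_single, flatMap_chain]
  simp only [List.nil_append]
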